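-- pv_equiv track=rewrite | github.com/spscally/fth-rolemaster | main.py | getCurrentLeaders
-- ===== SOURCE A (Python) =====
-- def getCurrentLeaders(progress):
--     names = []
--     max = -1
--     for member in progress:
--         count = 0
--         for role in progress[member]:
--             if progress[member][role] != "TODO":
--                 count += 1
--         if count > max:
--             max = count
--             names = [member]
--         elif count == max:
--             names.append(member)
--
--     return (names, max)
-- ===== SOURCE B (Python) =====
-- def getCurrentLeaders(progress):
--     counts = {m: sum(1 for v in roles.values() if v != "TODO")
--               for m, roles in progress.items()}
--     mx = max(counts.values(), default=-1)
--     names = [m for m, c in counts.items() if c == mx]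
--     return (names, mx)
-- ===== Notes on version B (the rewrite author's own statement) =====
-- stated objective: simpler
-- what changed: A fuses counting, running-max tracking and tie-list resetting into one stateful loop; B separates the work into three declarative passes: a counts table (dict comprehension), max(counts.values(), default=-1), and a filter of members whose count equals the maximum.
import Mathlib
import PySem

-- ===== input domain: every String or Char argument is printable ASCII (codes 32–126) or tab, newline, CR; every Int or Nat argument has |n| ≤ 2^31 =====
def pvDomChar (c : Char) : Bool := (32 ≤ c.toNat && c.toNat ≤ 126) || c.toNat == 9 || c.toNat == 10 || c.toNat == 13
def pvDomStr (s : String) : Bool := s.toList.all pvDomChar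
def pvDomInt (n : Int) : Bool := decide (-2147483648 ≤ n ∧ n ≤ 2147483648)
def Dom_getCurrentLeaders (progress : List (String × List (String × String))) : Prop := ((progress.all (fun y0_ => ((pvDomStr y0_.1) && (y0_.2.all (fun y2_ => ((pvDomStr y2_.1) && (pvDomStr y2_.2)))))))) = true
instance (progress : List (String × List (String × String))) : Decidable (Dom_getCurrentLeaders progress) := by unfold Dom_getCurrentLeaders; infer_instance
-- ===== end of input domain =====

-- B replaces A's fused loop (running max + reset/append tie list) by three separate passes:
-- a counts table, max with default -1, and a filter; objective: simpler.

-- ===== PORT A =====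
-- one pass; state = (names, max); inner loop counts non-"TODO" roles
def getCurrentLeaders (progress : List (String × List (String × String))) : List String × Int :=
  progress.foldl
    (fun st p =>
      let count : Int := p.2.foldl (fun c r => if r.2 ≠ "TODO" then c + 1 else c) 0
      if count > st.2 then ([p.1], count)
      else if count = st.2 then (st.1 ++ [p.1], st.2)
      else st)
    ([], -1)

-- ===== PORT B =====
def getCurrentLeaders_alt (progress : List (String × List (String × String))) : List String × Int :=
  let counts : List (String × Int) :=
    progress.map (fun p =>
      (p.1, (((p.2.map Prod.snd).filter (fun v => v ≠ "TODO")).map (fun _ => (1 : Int))).sum))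
  let mx : Int :=
    match PySem.List.max? (counts.map Prod.snd) (fun x => x) with
    | some m => m
    | none => -1
  let names : List String := (counts.filter (fun p => p.2 = mx)).map Prod.fst
  (names, mx)

-- ===== PRECONDITION & SPEC =====
def Spec_getCurrentLeaders (progress : List (String × List (String × String))) (out : List String × Int) : Prop := out = getCurrentLeaders_alt progress
instance (progress : List (String × List (String × String))) (out : List String × Int) : Decidable (Spec_getCurrentLeaders progress out) := by unfold Spec_getCurrentLeaders; infer_instance

-- ===== CLAIM =====
def Claim_equal_getCurrentLeaders : Prop := ∀ (progress : List (String × List (String × String))), Dom_getCurrentLeaders progress → Spec_getCurrentLeaders progress (getCurrentLeaders progress)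

-- ===== LEMMAS AND PROOFS =====

-- the count of non-"TODO" roles, as a nonnegative Int
def pvCnt (roles : List (String × String)) : Int :=
  ((roles.filter (fun r => r.2 ≠ "TODO")).length : Int)

theorem pvCnt_nonneg (roles : List (String × String)) : 0 ≤ pvCnt roles := by
  simp [pvCnt]

theorem cntA_eq (roles : List (String × String)) (c : Int) :
    roles.foldl (fun c r => if r.2 ≠ "TODO" then c + 1 else c) c = c + pvCnt roles := by
  induction roles generalizing c with
  | nil => simp [pvCnt]
  | cons h t ih =>
    rw [List.foldl_cons, ih]
    by_cases hh : h.2 = "TODO" <;> simp [pvCnt, List.filter_cons, hh] <;> push_cast <;> omega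

theorem cntB_eq (roles : List (String × String)) :
    (((roles.map Prod.snd).filter (fun v => v ≠ "TODO")).map (fun _ => (1 : Int))).sum = pvCnt roles := by
  induction roles with
  | nil => simp [pvCnt]
  | cons h t ih =>
    by_cases hh : h.2 = "TODO" <;>
      simp only [List.map_cons, List.filter_cons, hh, decide_not, List.sum_cons, pvCnt,
        List.length_cons, decide_true, decide_false, Bool.not_true, Bool.not_false,
        Bool.false_eq_true, if_false, if_true] at ih ⊢ <;>
      simp [pvCnt] at ih ⊢ <;> omega

theorem le_foldl_max_int (l : List Int) (a : Int) : a ≤ l.foldl max a := by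
  induction l generalizing a with
  | nil => simp
  | cons h t ih => exact le_trans (le_max_left a h) (ih (max a h))

-- characterization of A's loop on any suffix, generic accumulator
theorem loopA_char (l : List (String × List (String × String))) (names : List String) (mx : Int) :
    l.foldl
      (fun st p =>
        let count : Int := p.2.foldl (fun c r => if r.2 ≠ "TODO" then c + 1 else c) 0
        if count > st.2 then ([p.1], count)
        else if count = st.2 then (st.1 ++ [p.1], st.2)
        else st)
      (names, mx)
    = ((if (l.map (fun p => pvCnt p.2)).foldl max mx = mx then names else []) ++
        (l.filter (fun p => pvCnt p.2 = (l.map (fun p => pvCnt p.2)).foldl max mx)).map Prod.fst,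
       (l.map (fun p => pvCnt p.2)).foldl max mx) := by
  induction l generalizing names mx with
  | nil => simp
  | cons p t ih =>
    have hc : p.2.foldl (fun c r => if r.2 ≠ "TODO" then c + 1 else c) 0 = pvCnt p.2 := by
      simpa using cntA_eq p.2 0
    simp only [List.foldl_cons, List.map_cons, hc]
    rcases lt_trichotomy mx (pvCnt p.2) with hlt | heq | hgt
    · have hif : pvCnt p.2 > mx := hlt
      have hmax : max mx (pvCnt p.2) = pvCnt p.2 := max_eq_right (le_of_lt hlt)
      have hM : pvCnt p.2 ≤ (t.map (fun p => pvCnt p.2)).foldl max (pvCnt p.2) :=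
        le_foldl_max_int _ _
      simp only [hif, if_pos, gt_iff_lt, hmax]
      rw [ih]
      have hne : (t.map (fun p => pvCnt p.2)).foldl max (pvCnt p.2) ≠ mx := by omega
      rw [if_neg hne]
      by_cases he : pvCnt p.2 = (t.map (fun p => pvCnt p.2)).foldl max (pvCnt p.2)
      · rw [if_pos he.symm, List.filter_cons_of_pos (by simpa using he), List.map_cons]
        simp
      · rw [if_neg (fun h => he h.symm), List.filter_cons_of_neg (by simpa using he)]
    · subst heq
      rw [if_neg (lt_irrefl (pvCnt p.2)), if_pos rfl]
      simp only [max_self]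
      rw [ih]
      by_cases he : (t.map (fun p => pvCnt p.2)).foldl max (pvCnt p.2) = pvCnt p.2
      · rw [if_pos he, if_pos he, List.filter_cons_of_pos (by simp [he]), List.map_cons]
        simp
      · have hp : ¬ pvCnt p.2 = (t.map (fun p => pvCnt p.2)).foldl max (pvCnt p.2) :=
          fun h => he h.symm
        rw [if_neg he, if_neg he, List.filter_cons_of_neg (by simp [hp])]
    · have h1 : ¬ pvCnt p.2 > mx := by omega
      have h2 : ¬ pvCnt p.2 = mx := by omega
      have hmax : max mx (pvCnt p.2) = mx := by omega
      simp only [gt_iff_lt, h1, if_false, h2, hmax]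
      rw [ih]
      have hM : mx ≤ (t.map (fun p => pvCnt p.2)).foldl max mx := le_foldl_max_int _ _
      have hpe : ¬ pvCnt p.2 = (t.map (fun p => pvCnt p.2)).foldl max mx := by omega
      simp [List.filter_cons, hpe]

-- ===== VERDICT =====
theorem getCurrentLeaders_spec : Claim_equal_getCurrentLeaders := by
  intro progress _
  show getCurrentLeaders progress = getCurrentLeaders_alt progress
  have hcounts : progress.map (fun p =>
        (p.1, (((p.2.map Prod.snd).filter (fun v => v ≠ "TODO")).map (fun _ => (1 : Int))).sum))
      = progress.map (fun p => (p.1, pvCnt p.2)) :=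
    List.map_congr_left (fun a _ => by rw [cntB_eq])
  simp only [getCurrentLeaders, getCurrentLeaders_alt]
  rw [loopA_char, hcounts]
  cases progress with
  | nil => simp [PySem.List.max?]
  | cons p t =>
    simp only [List.map_cons, List.map_map, Function.comp_def]
    rw [PySem.List.max?_id_cons]
    have h0 : max (-1 : Int) (pvCnt p.2) = pvCnt p.2 :=
      max_eq_right (le_trans (by norm_num) (pvCnt_nonneg p.2))
    simp only [List.foldl_cons, h0]
    simp [List.filter_cons, List.filter_map, List.map_map, Function.comp_def, ite_self]
    by_cases hf : pvCnt p.2 = List.foldl max (pvCnt p.2) (List.map (fun p => pvCnt p.2) t)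
    · rw [if_pos hf, if_pos hf]
      simp [List.map_map, Function.comp_def]
    · rw [if_neg hf, if_neg hf]
      simp [List.map_map, Function.comp_def]
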